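-- pv_equiv track=rewrite | github.com/frnkthtnk101/CS-536 | CG_hw3/FrancosSub/CG_hw3.py | create_sphere
-- ===== SOURCE A (Python) =====
-- def create_sphere(radius, input_file, results_file_column_length):
--     '''
--     used to create a sphere in the file
--     requirement 3 the controll points are rep by spheres
--     '''
--     results_file_column_length_lth_zero = results_file_column_length < 0
--     if results_file_column_length_lth_zero:
--         return ''
--     string_builder = 'Separator {LightModel {model PHONG}Material {	diffuseColor 1.0 1.0 1.0}'
--     string_builder += 'Transform {translation\r\n'
--     string_builder += '{0}  {1}  {2}\r\n' \
--     .format(input_file[results_file_column_length][0],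
--             input_file[results_file_column_length][1],
--             input_file[results_file_column_length][2])
--     string_builder += '}}Sphere {{	radius {0} }}}}\r\n'.format(radius)
--     return string_builder + create_sphere(radius, input_file, results_file_column_length - 1)
-- ===== SOURCE B (Python) =====
-- def _block(radius, row):
--     return ('Separator {LightModel {model PHONG}Material {\tdiffuseColor 1.0 1.0 1.0}'
--             'Transform {translation\r\n'
--             + str(row[0]) + '  ' + str(row[1]) + '  ' + str(row[2]) + '\r\n'
--             + '}Sphere {\tradius ' + str(radius) + ' }}\r\n')
--
-- def create_sphere(radius, input_file, results_file_column_length):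
--     if results_file_column_length < 0:
--         return ''
--     blocks = [_block(radius, input_file[i]) for i in range(results_file_column_length + 1)]
--     return ''.join(reversed(blocks))
-- ===== Notes on version B (the rewrite author's own statement) =====
-- stated objective: simpler
-- what changed: Replaced the tail-building recursion with an iterative version: build the per-point blocks with a list comprehension over increasing indices 0..n, then join them in reversed order; the block text is assembled by plain concatenation in a helper instead of chained format calls.
import Mathlib
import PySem

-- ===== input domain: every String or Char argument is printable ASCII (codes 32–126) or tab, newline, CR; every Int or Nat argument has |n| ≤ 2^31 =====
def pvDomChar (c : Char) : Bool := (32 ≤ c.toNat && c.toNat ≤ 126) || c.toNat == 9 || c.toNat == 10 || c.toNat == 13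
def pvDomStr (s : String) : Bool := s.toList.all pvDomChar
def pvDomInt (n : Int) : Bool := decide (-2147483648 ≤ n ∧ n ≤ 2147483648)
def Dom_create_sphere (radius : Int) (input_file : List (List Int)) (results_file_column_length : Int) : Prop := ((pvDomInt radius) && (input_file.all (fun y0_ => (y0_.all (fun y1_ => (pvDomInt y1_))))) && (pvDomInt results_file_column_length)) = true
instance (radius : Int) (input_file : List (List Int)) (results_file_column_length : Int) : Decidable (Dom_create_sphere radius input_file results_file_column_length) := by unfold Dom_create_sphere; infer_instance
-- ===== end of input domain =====

-- B replaces A's recursion by a list comprehension over increasing indices joined in reversed order (objective: simpler).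

-- ===== PORT A =====
-- literal transliteration of A's recursion; out-of-range indexing (where Python raises
-- IndexError) is excluded by Pre_create_sphere, so the `.getD` defaults are never reached inside Pre_.
def create_sphere (radius : Int) (input_file : List (List Int)) (results_file_column_length : Int) : String :=
  if h : results_file_column_length < 0 then "" else
    let row := (PySem.List.pyGet? input_file results_file_column_length).getD []
    let string_builder := "Separator {LightModel {model PHONG}Material {\tdiffuseColor 1.0 1.0 1.0}"
    let string_builder := string_builder ++ "Transform {translation\r\n"
    let string_builder := string_builder ++
      PySem.Int.toStr ((PySem.List.pyGet? row 0).getD 0) ++ "  " ++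
      PySem.Int.toStr ((PySem.List.pyGet? row 1).getD 0) ++ "  " ++
      PySem.Int.toStr ((PySem.List.pyGet? row 2).getD 0) ++ "\r\n"
    let string_builder := string_builder ++ "}Sphere {\tradius " ++ PySem.Int.toStr radius ++ " }}\r\n"
    string_builder ++ create_sphere radius input_file (results_file_column_length - 1)
termination_by (results_file_column_length + 1).toNat
decreasing_by simp only [not_lt] at h; omega

-- ===== PORT B =====
-- helper _block of Source B
def pvBlock (radius : Int) (row : List Int) : String :=
  "Separator {LightModel {model PHONG}Material {\tdiffuseColor 1.0 1.0 1.0}" ++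
  "Transform {translation\r\n" ++
  PySem.Int.toStr ((PySem.List.pyGet? row 0).getD 0) ++ "  " ++
  PySem.Int.toStr ((PySem.List.pyGet? row 1).getD 0) ++ "  " ++
  PySem.Int.toStr ((PySem.List.pyGet? row 2).getD 0) ++ "\r\n" ++
  "}Sphere {\tradius " ++ PySem.Int.toStr radius ++ " }}\r\n"

def create_sphere_alt (radius : Int) (input_file : List (List Int)) (results_file_column_length : Int) : String :=
  if results_file_column_length < 0 then "" else
    let blocks := (PySem.List.pyRange 0 (results_file_column_length + 1) 1).map
      (fun i => pvBlock radius ((PySem.List.pyGet? input_file i).getD []))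
    String.join blocks.reverse

-- ===== PRECONDITION & SPEC =====
-- Pre_ excludes exactly the inputs where Python A raises IndexError: a nonnegative
-- requested index beyond the list, or a row among the used ones with fewer than 3 entries.
def Pre_create_sphere (radius : Int) (input_file : List (List Int)) (results_file_column_length : Int) : Prop :=
  results_file_column_length < 0 ∨
    (results_file_column_length < input_file.length ∧
      ∀ row ∈ input_file.take (results_file_column_length.toNat + 1), 3 ≤ row.length)
instance (radius : Int) (input_file : List (List Int)) (results_file_column_length : Int) : Decidable (Pre_create_sphere radius input_file results_file_column_length) := by unfold Pre_create_sphere; infer_instance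

def pvWitness_create_sphere : Int × List (List Int) × Int := (2, [[1, 2, 3], [4, 5, 6]], 1)

def Spec_create_sphere (radius : Int) (input_file : List (List Int)) (results_file_column_length : Int) (out : String) : Prop := out = create_sphere_alt radius input_file results_file_column_length
instance (radius : Int) (input_file : List (List Int)) (results_file_column_length : Int) (out : String) : Decidable (Spec_create_sphere radius input_file results_file_column_length out) := by unfold Spec_create_sphere; infer_instance

-- ===== CLAIM (what is proved, stated in full; the proofs are below) =====
def Claim_equal_create_sphere : Prop := ∀ (radius : Int) (input_file : List (List Int)) (results_file_column_length : Int), Dom_create_sphere radius input_file results_file_column_length → Pre_create_sphere radius input_file results_file_column_length → Spec_create_sphere radius input_file results_file_column_length (create_sphere radius input_file results_file_column_length)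

-- ===== LEMMAS AND PROOFS =====

-- the ports agree on ALL inputs (both are total with the same defaults), so Pre_ is not needed here
lemma create_sphere_neg (radius : Int) (input_file : List (List Int)) (n : Int) (h : n < 0) :
    create_sphere radius input_file n = "" := by
  rw [create_sphere.eq_def]; simp [h]

lemma foldl_append_init (l : List String) (s : String) :
    l.foldl (fun r x => r ++ x) s = s ++ l.foldl (fun r x => r ++ x) "" := by
  induction l generalizing s with
  | nil => simp
  | cons x t ih => simp only [List.foldl_cons]; rw [ih (s ++ x), ih ("" ++ x)]
                   simp [String.append_assoc]

lemma alt_step (radius : Int) (input_file : List (List Int)) (n : Int) (h : 0 ≤ n) :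
    create_sphere_alt radius input_file n
      = pvBlock radius ((PySem.List.pyGet? input_file n).getD [])
        ++ create_sphere_alt radius input_file (n - 1) := by
  unfold create_sphere_alt
  rw [if_neg (by omega : ¬ n < 0)]
  rw [PySem.List.pyRange_one_succ_right (a := 0) (b := n) h]
  by_cases h1 : n - 1 < 0
  · have hn : n = 0 := by omega
    subst hn
    rw [if_pos h1, PySem.List.pyRange_one_eq_nil (le_refl 0)]
    simp [String.join]
  · rw [if_neg h1]
    have h2 : n - 1 + 1 = n := by ring
    rw [h2]
    simp only [List.map_append, List.map_cons, List.map_nil, List.reverse_append,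
      List.reverse_cons, List.reverse_nil, List.nil_append, List.singleton_append,
      String.join, List.foldl_cons]
    rw [foldl_append_init]
    simp

lemma create_sphere_eq_alt (radius : Int) (input_file : List (List Int)) :
    ∀ (k : Nat), create_sphere radius input_file (k : Int) = create_sphere_alt radius input_file (k : Int) := by
  intro k
  induction k with
  | zero =>
      simp only [Nat.cast_zero]
      rw [create_sphere.eq_def]
      rw [alt_step radius input_file 0 (le_refl 0)]
      simp [pvBlock, String.append_assoc,
        create_sphere_neg radius input_file (-1) (by norm_num),
        create_sphere_alt]
  | succ m ih =>
      rw [create_sphere.eq_def]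
      rw [dif_neg (by push_cast; omega : ¬ (((m + 1 : Nat) : Int) < 0))]
      have hm : ((m + 1 : Nat) : Int) - 1 = (m : Int) := by push_cast; ring
      rw [alt_step radius input_file ((m + 1 : Nat) : Int) (by positivity)]
      rw [hm, ih]
      simp [pvBlock, String.append_assoc]

-- ===== VERDICT (by name: the statement is the Claim_ definition above) =====
theorem create_sphere_spec : Claim_equal_create_sphere := by
  intro radius input_file n _ _
  unfold Spec_create_sphere
  by_cases h : n < 0
  · rw [create_sphere.eq_def, create_sphere_alt]; simp [h]
  · have : n = ((n.toNat : Nat) : Int) := by omega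
    rw [this]
    exact create_sphere_eq_alt radius input_file n.toNat
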